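-- pv_equiv track=rewrite | github.com/Pamyt/GPT-Rewind | rewind/data_process/time_data.py | chat_frequency_distribution
-- ===== SOURCE A (Python) =====
-- from typing import List, Dict, Any
--
-- def chat_frequency_distribution(data_list: List[Dict[str, Any]]) -> Dict[Any, Any]:
--     """analyze chat frequency distribution"""
--     month_frequency_distribution = {}
--     day_frequency_distribution = {}
--     for session in data_list:
--         create_time = session.get("inserted_at", "")
--         if create_time:
--             create_time_ym = create_time[:7]  # Extract "YYYY-MM"
--             if create_time_ym not in month_frequency_distribution:
--                 month_frequency_distribution[create_time_ym] = 0
--             month_frequency_distribution[create_time_ym] += 1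
--             create_time_ymd = create_time[:10]  # Extract "YYYY-MM-DD"
--             if create_time_ymd not in day_frequency_distribution:
--                 day_frequency_distribution[create_time_ymd] = 0
--             day_frequency_distribution[create_time_ymd] += 1
--
--     return {"month_distribution": month_frequency_distribution,
--             "day_distribution": day_frequency_distribution}
-- ===== SOURCE B (Python) =====
-- from typing import List, Dict, Any
--
-- def chat_frequency_distribution(data_list: List[Dict[str, Any]]) -> Dict[Any, Any]:
--     """analyze chat frequency distribution"""
--     day_frequency_distribution = {}
--     for session in data_list:
--         create_time = session.get("inserted_at", "")
--         if create_time: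
--             ymd = create_time[:10]
--             day_frequency_distribution[ymd] = day_frequency_distribution.get(ymd, 0) + 1
--     month_frequency_distribution = {}
--     for ymd, count in day_frequency_distribution.items():
--         ym = ymd[:7]
--         month_frequency_distribution[ym] = month_frequency_distribution.get(ym, 0) + count
--     return {"month_distribution": month_frequency_distribution,
--             "day_distribution": day_frequency_distribution}
-- ===== Notes on version B (the rewrite author's own statement) =====
-- stated objective: alternative
-- what changed: B counts only the per-day table in the single pass over sessions (one dict update per session instead of two) and then derives the monthly totals by aggregating the day table's (day, count) items into months, instead of counting months directly from the sessions.
import Mathlib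
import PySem

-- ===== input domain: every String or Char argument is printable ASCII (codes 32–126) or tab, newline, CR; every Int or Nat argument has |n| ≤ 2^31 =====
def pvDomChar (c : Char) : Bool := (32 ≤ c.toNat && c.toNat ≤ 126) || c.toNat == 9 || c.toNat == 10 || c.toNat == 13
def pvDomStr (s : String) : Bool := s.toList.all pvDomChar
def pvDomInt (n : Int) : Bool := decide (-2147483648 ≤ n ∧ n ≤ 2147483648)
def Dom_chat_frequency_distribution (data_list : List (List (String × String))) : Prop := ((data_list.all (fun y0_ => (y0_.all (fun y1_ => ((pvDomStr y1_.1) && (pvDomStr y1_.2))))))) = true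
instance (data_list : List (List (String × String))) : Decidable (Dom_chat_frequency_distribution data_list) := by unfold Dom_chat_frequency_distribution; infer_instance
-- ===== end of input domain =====

-- B derives the monthly totals by aggregating the per-day table instead of counting months
-- directly from the sessions (alternative decomposition; same return value).

-- ===== PORT A =====
def chat_frequency_distribution (data_list : List (List (String × String))) : List (String × List (String × Int)) :=
  let st := data_list.foldl (fun st session =>
    let create_time := (PySem.Dict.mk session).getD "inserted_at" ""
    if create_time = "" then st
    else
      let create_time_ym := String.ofList (create_time.toList.take 7)     -- create_time[:7]
      let m := if st.1.contains create_time_ym then st.1 else st.1.insert create_time_ym (0 : Int)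
      let m := m.insert create_time_ym (m.getD create_time_ym 0 + 1)
      let create_time_ymd := String.ofList (create_time.toList.take 10)   -- create_time[:10]
      let d := if st.2.contains create_time_ymd then st.2 else st.2.insert create_time_ymd (0 : Int)
      let d := d.insert create_time_ymd (d.getD create_time_ymd 0 + 1)
      (m, d))
    ((PySem.Dict.empty : PySem.Dict String Int), (PySem.Dict.empty : PySem.Dict String Int))
  [("month_distribution", st.1.items), ("day_distribution", st.2.items)]

-- ===== PORT B =====
def chat_frequency_distribution_alt (data_list : List (List (String × String))) : List (String × List (String × Int)) :=
  let day := data_list.foldl (fun d session =>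
    let create_time := (PySem.Dict.mk session).getD "inserted_at" ""
    if create_time = "" then d
    else
      let ymd := String.ofList (create_time.toList.take 10)               -- create_time[:10]
      d.insert ymd (d.getD ymd 0 + 1))
    (PySem.Dict.empty : PySem.Dict String Int)
  let month := day.items.foldl (fun m p =>
    let ym := String.ofList (p.1.toList.take 7)                           -- ymd[:7]
    m.insert ym (m.getD ym 0 + p.2))
    (PySem.Dict.empty : PySem.Dict String Int)
  [("month_distribution", month.items), ("day_distribution", day.items)]

-- ===== PRECONDITION & SPEC =====
def Spec_chat_frequency_distribution (data_list : List (List (String × String))) (out : List (String × List (String × Int))) : Prop := out = chat_frequency_distribution_alt data_list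
instance (data_list : List (List (String × String))) (out : List (String × List (String × Int))) : Decidable (Spec_chat_frequency_distribution data_list out) := by unfold Spec_chat_frequency_distribution; infer_instance

-- ===== CLAIM (what is proved, stated in full; the proofs are below) =====
def Claim_equal_chat_frequency_distribution : Prop := ∀ (data_list : List (List (String × String))), Dom_chat_frequency_distribution data_list → Spec_chat_frequency_distribution data_list (chat_frequency_distribution data_list)

-- ===== LEMMAS AND PROOFS =====

-- the nonempty "inserted_at" values, in session order
def pvTimes (dl : List (List (String × String))) : List String :=
  dl.filterMap (fun session =>
    let ct := (PySem.Dict.mk session).getD "inserted_at" ""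
    if ct = "" then none else some ct)

-- A's "if key not in d: d[key] = 0; d[key] += 1" is one counting insert
theorem pv_collapse (d : PySem.Dict String Int) (k : String) :
    ((if d.contains k then d else d.insert k 0).insert k
      ((if d.contains k then d else d.insert k 0).getD k 0 + 1)) = d.insert k (d.getD k 0 + 1) := by
  by_cases h : d.contains k
  · simp [h]
  · have h' : d.contains k = false := by simpa using h
    rw [if_neg (by simp [h']), PySem.Dict.getD_insert_self, PySem.Dict.insert_insert_self,
      PySem.Dict.getD_of_not_contains d h' (d0 := 0)]

theorem pv_ofList_map_foldl {α β : Type} [BEq α] [LawfulBEq α] [BEq β] [LawfulBEq β]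
    (g : α → β) (L : List α) : ∀ (s : List α),
    PySem.Set.ofList ((L.foldl PySem.Set.add s).map g) =
      (L.map g).foldl PySem.Set.add (PySem.Set.ofList (s.map g)) := by
  induction L with
  | nil => intro s; simp [PySem.Set.ofList_eq_foldl]
  | cons a L ih =>
    intro s
    have key : PySem.Set.ofList ((PySem.Set.add s a).map g) =
        PySem.Set.add (PySem.Set.ofList (s.map g)) (g a) := by
      by_cases h : a ∈ s
      · have hg : g a ∈ PySem.Set.ofList (s.map g) := by
          rw [PySem.Set.mem_ofList]; exact List.mem_map_of_mem h
        simp [PySem.Set.add, h, hg]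
      · have hs : PySem.Set.add s a = s ++ [a] := by
          simp [PySem.Set.add, PySem.Set.contains, h]
        rw [hs, List.map_append]
        simp [PySem.Set.ofList_eq_foldl, List.foldl_append]
    simp only [List.foldl_cons, List.map_cons]
    rw [ih (PySem.Set.add s a), key]

-- deduplicating commutes with mapping g (first-occurrence order is preserved)
theorem pv_ofList_map_ofList {α β : Type} [BEq α] [LawfulBEq α] [BEq β] [LawfulBEq β]
    (g : α → β) (L : List α) :
    PySem.Set.ofList ((PySem.Set.ofList L).map g) = PySem.Set.ofList (L.map g) := by
  simpa [PySem.Set.ofList_eq_foldl] using pv_ofList_map_foldl g L []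

-- the value at b of B's aggregation loop is the sum of the counts mapped onto b
theorem pv_getD_agg (g : String → String) : ∀ (ps : List (String × Int)) (m0 : PySem.Dict String Int) (b : String),
    (ps.foldl (fun m p => m.insert (g p.1) (m.getD (g p.1) 0 + p.2)) m0).getD b 0
      = m0.getD b 0 + ((ps.filter (fun p => g p.1 == b)).map (·.2)).sum := by
  intro ps
  induction ps with
  | nil => intro m0 b; simp
  | cons p ps ih =>
    intro m0 b
    simp only [List.foldl_cons, List.filter_cons]
    rw [ih]
    by_cases h : g p.1 = b
    · simp [h]
      ring
    · simp [h, PySem.Dict.getD_insert, Ne.symm h]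

-- counts of L grouped over the distinct keys D and projected by g partition the count of b in L.map g
theorem pv_count_partition {α β : Type} [BEq α] [LawfulBEq α] [BEq β] [LawfulBEq β]
    (g : α → β) (b : β) (D : List α) (hD : D.Nodup) :
    ∀ (L : List α), (∀ x ∈ L, x ∈ D) →
    ((D.filter (fun k => g k == b)).map (fun k => (L.count k : Int))).sum = ((L.map g).count b : Int) := by
  intro L
  induction L with
  | nil => intro _; simp
  | cons a L ih =>
    intro hsub
    have haD : a ∈ D := hsub a (by simp)
    have hrest : ∀ x ∈ L, x ∈ D := fun x hx => hsub x (by simp [hx])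
    have hcnt : ∀ k : α, (((a :: L).count k : Nat) : Int) = (L.count k : Int) + (if k == a then (1:Int) else 0) := by
      intro k; rw [List.count_cons]; push_cast
      by_cases h : k = a
      · simp [h]
      · have h' : ¬(a = k) := fun e => h e.symm
        simp [h, h']
    have step1 : ((D.filter (fun k => g k == b)).map (fun k => ((a :: L).count k : Int))).sum
        = ((D.filter (fun k => g k == b)).map (fun k => (L.count k : Int) + (if k == a then (1:Int) else 0))).sum := by
      congr 1; exact List.map_congr_left (fun k _ => hcnt k)
    have h1 : ((D.filter (fun k => g k == b)).map (fun k => (if k == a then (1:Int) else 0))).sum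
        = (((D.filter (fun k => g k == b)).count a : Nat) : Int) := by
      rw [PySem.List.sum_map_ite_one_zero]
      simp [List.count]
    have h2 : (((D.filter (fun k => g k == b)).count a : Nat) : Int) = (if g a == b then (1:Int) else 0) := by
      by_cases hg : (g a == b) = true
      · rw [if_pos hg, List.count_eq_one_of_mem (hD.filter _) (List.mem_filter.mpr ⟨haD, hg⟩)]
        norm_num
      · have hz : List.count a (D.filter (fun k => g k == b)) = 0 := by
          rw [List.count_eq_zero]; simp [List.mem_filter, hg]
        rw [if_neg hg, hz]; norm_num
    have h3 : (((a :: L).map g).count b : Int) = ((L.map g).count b : Int) + (if g a == b then (1:Int) else 0) := by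
      simp only [List.map_cons]
      rw [List.count_cons]
      push_cast
      ring
    rw [step1, PySem.List.sum_map_add_int, ih hrest, h1, h2, h3]

-- aggregating Counter(L) by g yields Counter(L.map g), including insertion order
theorem pv_agg_counter (g : String → String) (L : List String) :
    ((PySem.Dict.counter L : PySem.Dict String Int).items.foldl
      (fun m p => m.insert (g p.1) (m.getD (g p.1) 0 + p.2)) PySem.Dict.empty)
    = PySem.Dict.counter (L.map g) := by
  set lhs := ((PySem.Dict.counter L : PySem.Dict String Int).items.foldl
      (fun m p => m.insert (g p.1) (m.getD (g p.1) 0 + p.2)) PySem.Dict.empty) with hlhs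
  have hkeysL : lhs.keys = PySem.Set.ofList (L.map g) := by
    rw [hlhs, PySem.Dict.keys_foldl_insert_key (key := fun p : String × Int => g p.1)
      (f := fun (m : PySem.Dict String Int) (p : String × Int) => m.getD (g p.1) 0 + p.2)]
    rw [PySem.Dict.items_counter, List.map_map]
    have : ((fun p : String × Int => g p.1) ∘ fun k => (k, (L.count k : Int))) = g := rfl
    rw [this, PySem.Dict.keys_empty]
    show (((PySem.Set.ofList L).map g).foldl PySem.Set.add []) = _
    rw [← PySem.Set.ofList_eq_foldl, pv_ofList_map_ofList]
  have hkeysR : (PySem.Dict.counter (L.map g) : PySem.Dict String Int).keys = PySem.Set.ofList (L.map g) :=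
    PySem.Dict.keys_counter _
  have hndL : lhs.keys.Nodup := by rw [hkeysL]; exact PySem.Set.nodup_ofList _
  have hndR : (PySem.Dict.counter (L.map g) : PySem.Dict String Int).keys.Nodup := by
    rw [hkeysR]; exact PySem.Set.nodup_ofList _
  have hgetD : ∀ b, lhs.getD b 0 = (PySem.Dict.counter (L.map g) : PySem.Dict String Int).getD b 0 := by
    intro b
    rw [hlhs, pv_getD_agg, PySem.Dict.getD_empty, PySem.Dict.items_counter, PySem.Dict.getD_counter]
    rw [List.filter_map, List.map_map]
    have e1 : (fun p : String × Int => g p.1 == b) ∘ (fun k => (k, (L.count k : Int))) = fun k => g k == b := rfl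
    have e2 : ((fun p : String × Int => p.2) ∘ fun k => (k, (L.count k : Int))) = fun k => (L.count k : Int) := rfl
    rw [e1, e2, pv_count_partition g b (PySem.Set.ofList L) (PySem.Set.nodup_ofList L) L
      (fun x hx => (PySem.Set.mem_ofList L x).mpr hx)]
    ring
  apply PySem.Dict.ext
  rw [PySem.Dict.items_eq_map_keys lhs hndL 0,
    PySem.Dict.items_eq_map_keys (PySem.Dict.counter (L.map g)) hndR 0, hkeysL, hkeysR]
  exact List.map_congr_left (fun k _ => by rw [hgetD k])

-- a counting insert loop over keyed elements is Counter of the mapped keys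
theorem pv_fold_inc_counter (k : String → String) (ts : List String) :
    ts.foldl (fun m t => m.insert (k t) (m.getD (k t) 0 + 1)) (PySem.Dict.empty : PySem.Dict String Int)
      = PySem.Dict.counter (ts.map k) := by
  rw [← PySem.Dict.foldl_insert_getD_add_one_eq_counter, List.foldl_map]

-- A's single pass is two independent counting passes over pvTimes
theorem pv_foldA (dl : List (List (String × String))) : ∀ (m d : PySem.Dict String Int),
    dl.foldl (fun st session =>
      let create_time := (PySem.Dict.mk session).getD "inserted_at" ""
      if create_time = "" then st
      else
        let create_time_ym := String.ofList (create_time.toList.take 7)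
        let m := if st.1.contains create_time_ym then st.1 else st.1.insert create_time_ym (0 : Int)
        let m := m.insert create_time_ym (m.getD create_time_ym 0 + 1)
        let create_time_ymd := String.ofList (create_time.toList.take 10)
        let d := if st.2.contains create_time_ymd then st.2 else st.2.insert create_time_ymd (0 : Int)
        let d := d.insert create_time_ymd (d.getD create_time_ymd 0 + 1)
        (m, d)) (m, d)
    = ((pvTimes dl).foldl (fun m t =>
          m.insert (String.ofList (t.toList.take 7)) (m.getD (String.ofList (t.toList.take 7)) 0 + 1)) m,
       (pvTimes dl).foldl (fun d t =>
          d.insert (String.ofList (t.toList.take 10)) (d.getD (String.ofList (t.toList.take 10)) 0 + 1)) d) := by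
  induction dl with
  | nil => intro m d; simp [pvTimes]
  | cons s dl ih =>
    intro m d
    by_cases h : (PySem.Dict.mk s).getD "inserted_at" "" = ""
    · simp only [List.foldl_cons, pvTimes, List.filterMap_cons, h, if_pos]
      simpa [pvTimes, h] using ih m d
    · simp only [List.foldl_cons, pvTimes, List.filterMap_cons]
      rw [if_neg h]
      simp only [h, if_false]
      rw [pv_collapse, pv_collapse]
      simpa [pvTimes] using ih _ _

-- B's day pass is the same counting pass over pvTimes
theorem pv_foldB (dl : List (List (String × String))) : ∀ (d : PySem.Dict String Int),
    dl.foldl (fun d session =>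
      let create_time := (PySem.Dict.mk session).getD "inserted_at" ""
      if create_time = "" then d
      else
        let ymd := String.ofList (create_time.toList.take 10)
        d.insert ymd (d.getD ymd 0 + 1)) d
    = (pvTimes dl).foldl (fun d t =>
        d.insert (String.ofList (t.toList.take 10)) (d.getD (String.ofList (t.toList.take 10)) 0 + 1)) d := by
  induction dl with
  | nil => intro d; simp [pvTimes]
  | cons s dl ih =>
    intro d
    by_cases h : (PySem.Dict.mk s).getD "inserted_at" "" = ""
    · simp only [List.foldl_cons, pvTimes, List.filterMap_cons, h, if_pos]
      simpa [pvTimes, h] using ih d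
    · simp only [List.foldl_cons, pvTimes, List.filterMap_cons]
      rw [if_neg h]
      simp only [h, if_false]
      simpa [pvTimes] using ih _

-- pv_agg_counter specialized to the month projection
theorem pv_agg_counter7 (L : List String) :
    ((PySem.Dict.counter L : PySem.Dict String Int).items.foldl
      (fun m p => m.insert (String.ofList (p.1.toList.take 7))
        (m.getD (String.ofList (p.1.toList.take 7)) 0 + p.2)) PySem.Dict.empty)
    = PySem.Dict.counter (L.map (fun s => String.ofList (s.toList.take 7))) := by
  exact pv_agg_counter (fun s => String.ofList (s.toList.take 7)) L

theorem pv_take7_take10 (t : String) :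
    String.ofList ((String.ofList (t.toList.take 10)).toList.take 7) = String.ofList (t.toList.take 7) := by
  simp [List.take_take]

-- ===== VERDICT (by name: the statement is the Claim_ definition above) =====
theorem chat_frequency_distribution_spec : Claim_equal_chat_frequency_distribution := by
  intro data_list _
  unfold Spec_chat_frequency_distribution chat_frequency_distribution chat_frequency_distribution_alt
  rw [pv_foldA, pv_foldB, pv_fold_inc_counter, pv_fold_inc_counter]
  simp only [pv_agg_counter7, List.map_map]
  have hmap : List.map ((fun s => String.ofList (s.toList.take 7)) ∘ (fun t => String.ofList (t.toList.take 10))) (pvTimes data_list)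
      = List.map (fun t => String.ofList (t.toList.take 7)) (pvTimes data_list) :=
    List.map_congr_left (fun t _ => pv_take7_take10 t)
  rw [hmap]
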